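-- pv_equiv track=rewrite | github.com/chikingsley/model-manager | backends/vllm/nemotron_parse_vllm_logitprocs.py | _max_consecutive_repetitions
-- ===== SOURCE A (Python) =====
-- from typing import Dict, List, Set
--
-- def _max_consecutive_repetitions(seq: List[int], n: int) -> int:
--     if len(seq) < n:
--         return 0
--     max_consec = 1
--     cur = 1
--     prev = tuple(seq[0:n])
--     i = n
--     while i <= len(seq) - n:
--         cur_ng = tuple(seq[i:i + n])
--         if cur_ng == prev:
--             cur += 1
--             if cur > max_consec:
--                 max_consec = cur
--             i += n
--         else:
--             cur = 1
--             prev = cur_ng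
--             i += 1
--     return max_consec
-- ===== SOURCE B (Python) =====
-- def _max_consecutive_repetitions(seq, n):
--     L = len(seq)
--     if L < n:
--         return 0
--     # eruns[j]: length of the run of positions t <= j with seq[t] == seq[t+n], ending at j
--     eruns = []
--     e = 0
--     for j in range(L - n):
--         e = e + 1 if seq[j] == seq[j + n] else 0
--         eruns.append(e)
--     # cruns[j]: length of the constant run of seq ending at position j
--     cruns = []
--     c = 0
--     for j in range(L):
--         c = c + 1 if j > 0 and seq[j] == seq[j - 1] else 1
--         cruns.append(c)
--     best = cur = 1
--     p = 0  # anchor: the previous n-gram is seq[p:p+n]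
--     i = n
--     while i <= L - n:
--         d = i - p
--         if (eruns[i - 1] >= d) if d % n == 0 else (cruns[i + n - 1] >= d + n):
--             cur += 1
--             if cur > best:
--                 best = cur
--             i += n
--         else:
--             cur = 1
--             p = i
--             i += 1
--     return best
-- ===== Notes on version B (the rewrite author's own statement) =====
-- stated objective: alternative
-- what changed: B precomputes two run tables (lengths of runs of seq[j]==seq[j+n] and of constant runs) and decides each n-gram comparison of the greedy scan by a table test instead of A's slice-and-compare.
import Mathlib
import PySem

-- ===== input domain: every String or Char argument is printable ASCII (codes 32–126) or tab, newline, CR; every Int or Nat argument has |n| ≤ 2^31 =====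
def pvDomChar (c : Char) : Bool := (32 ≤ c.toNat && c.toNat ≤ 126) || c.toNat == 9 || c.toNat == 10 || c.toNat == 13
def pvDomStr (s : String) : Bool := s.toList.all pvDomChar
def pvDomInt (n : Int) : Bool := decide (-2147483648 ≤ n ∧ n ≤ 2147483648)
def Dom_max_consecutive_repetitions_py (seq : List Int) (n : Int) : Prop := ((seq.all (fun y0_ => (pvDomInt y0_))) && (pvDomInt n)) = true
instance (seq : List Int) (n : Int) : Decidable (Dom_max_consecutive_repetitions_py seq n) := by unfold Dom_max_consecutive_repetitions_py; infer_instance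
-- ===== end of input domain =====

-- B drives the same greedy scan from two precomputed equality-run tables (run lengths of
-- seq[j]==seq[j+n] and of constant runs), replacing A's n-gram slice comparisons by table
-- tests; equivalence is about the return value; neither version mutates its arguments.

-- ===== PORT A =====
-- the while loop of A; fuel only makes the recursion total (under Pre_ it never runs out)
def pvLoopA (seq : List Int) (n : Int) : Nat → Int → Int → Int → List Int → Int
  | 0, _, _, maxc, _ => maxc
  | fuel+1, i, cur, maxc, prev =>
    if i ≤ (seq.length : Int) - n then
      let cur_ng := PySem.List.slice seq (some i) (some (i + n))
      if cur_ng = prev then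
        let cur' := cur + 1
        pvLoopA seq n fuel (i + n) cur' (if cur' > maxc then cur' else maxc) prev
      else
        pvLoopA seq n fuel (i + 1) 1 maxc cur_ng
    else maxc

def max_consecutive_repetitions_py (seq : List Int) (n : Int) : Int :=
  if (seq.length : Int) < n then 0
  else pvLoopA seq n (seq.length + 1) n 1 1 (PySem.List.slice seq (some 0) (some n))

-- ===== PORT B =====
-- eruns pass: e = e + 1 if seq[j] == seq[j + n] else 0; eruns.append(e)
def pvEruns (seq : List Int) (n : Int) : List Int × Int :=
  (PySem.List.pyRange 0 ((seq.length : Int) - n) 1).foldl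
    (fun (st : List Int × Int) j =>
      let e := if PySem.List.pyGetD seq j 0 = PySem.List.pyGetD seq (j + n) 0 then st.2 + 1 else 0
      (st.1 ++ [e], e)) ([], 0)

-- cruns pass: c = c + 1 if j > 0 and seq[j] == seq[j - 1] else 1; cruns.append(c)
def pvCruns (seq : List Int) : List Int × Int :=
  (PySem.List.pyRange 0 (seq.length : Int) 1).foldl
    (fun (st : List Int × Int) j =>
      let c := if 0 < j ∧ PySem.List.pyGetD seq j 0 = PySem.List.pyGetD seq (j - 1) 0 then st.2 + 1 else 1
      (st.1 ++ [c], c)) ([], 0)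

-- the while loop of B; fuel only makes the recursion total
def pvLoopB (seq : List Int) (n : Int) (eruns cruns : List Int) : Nat → Int → Int → Int → Int → Int
  | 0, _, _, best, _ => best
  | fuel+1, i, cur, best, p =>
    if i ≤ (seq.length : Int) - n then
      let d := i - p
      if (if PySem.Int.mod d n = 0
          then (d ≤ PySem.List.pyGetD eruns (i - 1) 0)
          else (d + n ≤ PySem.List.pyGetD cruns (i + n - 1) 0)) then
        let cur' := cur + 1
        pvLoopB seq n eruns cruns fuel (i + n) cur' (if cur' > best then cur' else best) p
      else
        pvLoopB seq n eruns cruns fuel (i + 1) 1 best i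
    else best

def max_consecutive_repetitions_py_alt (seq : List Int) (n : Int) : Int :=
  if (seq.length : Int) < n then 0
  else
    let eruns := (pvEruns seq n).1
    let cruns := (pvCruns seq).1
    pvLoopB seq n eruns cruns (seq.length + 1) n 1 1 0

-- ===== PRECONDITION & SPEC =====
-- Pre_ excludes exactly n ≤ 0: there A's while loop never terminates (i += n / i += 1 never
-- leaves the window), so A returns on no such input.
def Pre_max_consecutive_repetitions_py (seq : List Int) (n : Int) : Prop := 1 ≤ n
instance (seq : List Int) (n : Int) : Decidable (Pre_max_consecutive_repetitions_py seq n) := by unfold Pre_max_consecutive_repetitions_py; infer_instance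

def pvWitness_max_consecutive_repetitions_py : List Int × Int := ([1, 1, 1, 1], 2)

def Spec_max_consecutive_repetitions_py (seq : List Int) (n : Int) (out : Int) : Prop := out = max_consecutive_repetitions_py_alt seq n
instance (seq : List Int) (n : Int) (out : Int) : Decidable (Spec_max_consecutive_repetitions_py seq n out) := by unfold Spec_max_consecutive_repetitions_py; infer_instance

-- ===== CLAIM (what is proved, stated in full; the proofs are below) =====
def Claim_equal_max_consecutive_repetitions_py : Prop := ∀ (seq : List Int) (n : Int), Dom_max_consecutive_repetitions_py seq n → Pre_max_consecutive_repetitions_py seq n → Spec_max_consecutive_repetitions_py seq n (max_consecutive_repetitions_py seq n)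

-- ===== LEMMAS AND PROOFS =====

-- run of positions t ≤ j with seq[t] = seq[t+N], ending at j (the value eruns[j])
def pvErun (seq : List Int) (N : Nat) : Nat → Int
  | 0 => if seq.getD 0 0 = seq.getD N 0 then 1 else 0
  | j+1 => if seq.getD (j+1) 0 = seq.getD (j+1+N) 0 then pvErun seq N j + 1 else 0

-- constant run of seq ending at j (the value cruns[j])
def pvCrun (seq : List Int) : Nat → Int
  | 0 => 1
  | j+1 => if seq.getD (j+1) 0 = seq.getD j 0 then pvCrun seq j + 1 else 1

lemma pvErun_nonneg (seq : List Int) (N : Nat) : ∀ j, 0 ≤ pvErun seq N j := by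
  intro j; induction j with
  | zero => simp only [pvErun]; split_ifs <;> omega
  | succ k ih => simp only [pvErun]; split_ifs <;> omega

lemma pvCrun_pos (seq : List Int) : ∀ j, 1 ≤ pvCrun seq j := by
  intro j; induction j with
  | zero => simp [pvCrun]
  | succ k ih => simp only [pvCrun]; split_ifs <;> omega

lemma pvErun_ge_iff (seq : List Int) (N : Nat) :
    ∀ j t : Nat, t ≤ j + 1 →
      ((t : Int) ≤ pvErun seq N j ↔
        ∀ u, j + 1 ≤ u + t → u ≤ j → seq.getD u 0 = seq.getD (u + N) 0) := by
  intro j; induction j with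
  | zero =>
    intro t ht
    interval_cases t
    · constructor
      · intro _ u h1 h2; omega
      · intro _; exact pvErun_nonneg seq N 0
    · simp only [pvErun]
      constructor
      · intro h u h1 h2
        have hu : u = 0 := by omega
        subst hu; split_ifs at h with hE
        · simpa using hE
        · omega
      · intro h
        have := h 0 (by omega) (by omega)
        simp only [Nat.zero_add] at this
        rw [if_pos this]; norm_num
  | succ k ih =>
    intro t ht
    match t with
    | 0 =>
      constructor
      · intro _ u h1 h2; omega
      · intro _; exact pvErun_nonneg seq N (k+1)
    | s+1 =>
      have hs : s ≤ k + 1 := by omega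
      simp only [pvErun]
      constructor
      · intro h u h1 h2
        split_ifs at h with hE
        · rcases Nat.lt_or_ge u (k+1) with hu | hu
          · have := (ih s hs).mp (by omega) u (by omega) (by omega)
            exact this
          · have hu' : u = k + 1 := by omega
            subst hu'; exact hE
        · omega
      · intro h
        have hE : seq.getD (k+1) 0 = seq.getD (k+1+N) 0 := h (k+1) (by omega) (by omega)
        rw [if_pos hE]
        have : (s : Int) ≤ pvErun seq N k := by
          apply (ih s hs).mpr
          intro u h1 h2
          exact h u (by omega) (by omega)
        omega

lemma pvCrun_ge_iff (seq : List Int) :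
    ∀ j t : Nat, t ≤ j + 1 →
      ((t : Int) ≤ pvCrun seq j ↔
        ∀ u, j + 1 ≤ u + t → u ≤ j → seq.getD u 0 = seq.getD j 0) := by
  intro j; induction j with
  | zero =>
    intro t ht
    interval_cases t
    · constructor
      · intro _ u h1 h2; omega
      · intro _; have := pvCrun_pos seq 0; omega
    · constructor
      · intro _ u h1 h2
        have : u = 0 := by omega
        subst this; rfl
      · intro _; exact pvCrun_pos seq 0
  | succ k ih =>
    intro t ht
    match t with
    | 0 =>
      constructor
      · intro _ u h1 h2; omega
      · intro _; have := pvCrun_pos seq (k+1); omega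
    | 1 =>
      constructor
      · intro _ u h1 h2
        have : u = k + 1 := by omega
        subst this; rfl
      · intro _; exact pvCrun_pos seq (k+1)
    | s+2 =>
      have hs : s + 1 ≤ k + 1 := by omega
      simp only [pvCrun]
      constructor
      · intro h u h1 h2
        split_ifs at h with hE
        · rcases Nat.lt_or_ge u (k+1) with hu | hu
          · have := (ih (s+1) hs).mp (by omega) u (by omega) (by omega)
            rw [this, hE]
          · have hu' : u = k + 1 := by omega
            subst hu'; rfl
        · omega
      · intro h
        have hE : seq.getD (k+1) 0 = seq.getD k 0 :=
          (h (k+1) (by omega) (by omega)) ▸ (h k (by omega) (by omega)).symm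
        rw [if_pos hE]
        have : ((s+1 : Nat) : Int) ≤ pvCrun seq k := by
          apply (ih (s+1) hs).mpr
          intro u h1 h2
          rw [h u (by omega) (by omega), ← hE]
        push_cast at this ⊢
        omega

-- stepping along an equality run: seq[j] = seq[j + k*N] when every stride stays in the run
lemma pvStep (seq : List Int) (N : Nat) (p q : Nat)
    (hE : ∀ u, p ≤ u → u < q → seq.getD u 0 = seq.getD (u + N) 0) :
    ∀ k j, p ≤ j → j + k * N < q + N → seq.getD j 0 = seq.getD (j + k * N) 0 := by
  intro k
  induction k with
  | zero => intro j _ _; simp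
  | succ m ih =>
    intro j hj hb
    have h1 : seq.getD j 0 = seq.getD (j + m * N) 0 := ih j hj (by
      have : m * N ≤ (m+1) * N := Nat.mul_le_mul_right N (by omega)
      omega)
    have h2 : seq.getD (j + m * N) 0 = seq.getD (j + m * N + N) 0 := by
      apply hE _ (by omega)
      have : (m+1) * N = m * N + N := by ring
      omega
    rw [h1, h2]
    congr 1
    ring

-- slice equality is pointwise equality
lemma pvSliceEq (seq : List Int) (N a b : Nat)
    (ha : a + N ≤ seq.length) (hb : b + N ≤ seq.length) :
    (PySem.List.slice seq (some (a : Int)) (some ((a : Int) + (N : Int))) =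
      PySem.List.slice seq (some (b : Int)) (some ((b : Int) + (N : Int)))) ↔
    ∀ k, k < N → seq.getD (a + k) 0 = seq.getD (b + k) 0 := by
  rw [PySem.List.slice_natCast_add, PySem.List.slice_natCast_add]
  have la : ((seq.drop a).take N).length = N := by
    simp [List.length_take, List.length_drop]; omega
  have lb : ((seq.drop b).take N).length = N := by
    simp [List.length_take, List.length_drop]; omega
  constructor
  · intro h k hk
    have := congrArg (fun l => l.getD k (0:Int)) h
    simp only [List.getD_eq_getElem?_getD, List.getElem?_take, List.getElem?_drop] at this ⊢
    simpa [hk] using this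
  · intro h
    apply List.ext_getElem (by rw [la, lb])
    intro k hk1 hk2
    rw [la] at hk1
    have h1 : ((seq.drop a).take N)[k] = seq[a + k]'(by omega) := by
      rw [List.getElem_take, List.getElem_drop]
    have h2 : ((seq.drop b).take N)[k] = seq[b + k]'(by omega) := by
      rw [List.getElem_take, List.getElem_drop]
    rw [h1, h2]
    have := h k hk1
    rw [List.getD_eq_getElem?_getD, List.getD_eq_getElem?_getD,
        List.getElem?_eq_getElem (by omega), List.getElem?_eq_getElem (by omega)] at this
    simpa using this

-- the eruns table holds pvErun
lemma pvEruns_spec (seq : List Int) (N : Nat) :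
    ∀ m : Nat,
      (PySem.List.pyRange 0 (m : Int) 1).foldl
        (fun (st : List Int × Int) j =>
          let e := if PySem.List.pyGetD seq j 0 = PySem.List.pyGetD seq (j + (N : Int)) 0 then st.2 + 1 else 0
          (st.1 ++ [e], e)) ([], 0) =
      ((List.range m).map (pvErun seq N), if m = 0 then 0 else pvErun seq N (m - 1)) := by
  intro m
  induction m with
  | zero => simp [PySem.List.pyRange_one_eq_nil]
  | succ k ih =>
    have hsplit : PySem.List.pyRange 0 ((k+1 : Nat) : Int) 1 =
        PySem.List.pyRange 0 (k : Int) 1 ++ [(k : Int)] := by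
      have := PySem.List.pyRange_one_succ_right (a := 0) (b := (k : Int)) (by exact_mod_cast Nat.zero_le k)
      push_cast
      exact this
    rw [hsplit, List.foldl_append, ih]
    simp only [List.foldl_cons, List.foldl_nil]
    have hget1 : PySem.List.pyGetD seq (k : Int) 0 = seq.getD k 0 := by
      simp only [PySem.List.pyGetD_natCast]
    have hget2 : PySem.List.pyGetD seq ((k : Int) + (N : Int)) 0 = seq.getD (k + N) 0 := by
      rw [show (k : Int) + (N : Int) = ((k + N : Nat) : Int) from by push_cast; ring]
      simp only [PySem.List.pyGetD_natCast]
    rw [List.range_succ, List.map_append]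
    cases k with
    | zero =>
      simp only [hget1, hget2]
      simp [pvErun]
    | succ k' =>
      simp only [hget1, hget2]
      simp only [Nat.succ_sub_one]
      have : pvErun seq N (k' + 1) =
          if seq.getD (k'+1) 0 = seq.getD (k'+1+N) 0 then pvErun seq N k' + 1 else 0 := rfl
      simp [this]

-- the cruns table holds pvCrun
lemma pvCruns_spec (seq : List Int) :
    ∀ m : Nat,
      (PySem.List.pyRange 0 (m : Int) 1).foldl
        (fun (st : List Int × Int) j =>
          let c := if 0 < j ∧ PySem.List.pyGetD seq j 0 = PySem.List.pyGetD seq (j - 1) 0 then st.2 + 1 else 1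
          (st.1 ++ [c], c)) ([], 0) =
      ((List.range m).map (pvCrun seq), if m = 0 then 0 else pvCrun seq (m - 1)) := by
  intro m
  induction m with
  | zero => simp [PySem.List.pyRange_one_eq_nil]
  | succ k ih =>
    have hsplit : PySem.List.pyRange 0 ((k+1 : Nat) : Int) 1 =
        PySem.List.pyRange 0 (k : Int) 1 ++ [(k : Int)] := by
      have := PySem.List.pyRange_one_succ_right (a := 0) (b := (k : Int)) (by exact_mod_cast Nat.zero_le k)
      push_cast
      exact this
    rw [hsplit, List.foldl_append, ih]
    simp only [List.foldl_cons, List.foldl_nil]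
    rw [List.range_succ, List.map_append]
    cases k with
    | zero =>
      simp [pvCrun]
    | succ k' =>
      have hget1 : PySem.List.pyGetD seq ((k'+1 : Nat) : Int) 0 = seq.getD (k'+1) 0 := by
        simp only [PySem.List.pyGetD_natCast]
      have hget2 : PySem.List.pyGetD seq (((k'+1 : Nat) : Int) - 1) 0 = seq.getD k' 0 := by
        rw [show ((k'+1 : Nat) : Int) - 1 = ((k' : Nat) : Int) from by push_cast; ring]
        simp only [PySem.List.pyGetD_natCast]
      have hpos : (0 : Int) < ((k'+1 : Nat) : Int) := by exact_mod_cast Nat.succ_pos k'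
      simp only [hget1, hget2, hpos, true_and]
      simp only [Nat.succ_sub_one]
      have : pvCrun seq (k' + 1) =
          if seq.getD (k'+1) 0 = seq.getD k' 0 then pvCrun seq k' + 1 else 1 := rfl
      simp [this]


lemma pvGetMapRange (f : Nat → Int) (m j : Nat) (h : j < m) :
    ((List.range m).map f).getD j 0 = f j := by
  rw [List.getD_eq_getElem?_getD, List.getElem?_map, List.getElem?_range h]
  rfl

lemma pvErunsFst (seq : List Int) (N : Nat) (h : N ≤ seq.length) :
    (pvEruns seq (N : Int)).1 = (List.range (seq.length - N)).map (pvErun seq N) := by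
  unfold pvEruns
  rw [show (seq.length : Int) - (N : Int) = ((seq.length - N : Nat) : Int) from by push_cast; omega,
      pvEruns_spec seq N (seq.length - N)]

lemma pvCrunsFst (seq : List Int) :
    (pvCruns seq).1 = (List.range seq.length).map (pvCrun seq) := by
  unfold pvCruns
  rw [show (seq.length : Int) = ((seq.length : Nat) : Int) from rfl, pvCruns_spec seq seq.length]

-- periodic anchors: given the run up to iN - N, block equality at iN extends the run to iN
lemma pvPeriodicIff (seq : List Int) (N pN iN : Nat) (hN : 1 ≤ N)
    (hlt : pN < iN) (hdvd : N ∣ (iN - pN))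
    (hinv : ∀ u, pN ≤ u → u + N < iN → seq.getD u 0 = seq.getD (u + N) 0) :
    ((∀ k, k < N → seq.getD (iN + k) 0 = seq.getD (pN + k) 0) ↔
      (∀ u, pN ≤ u → u < iN → seq.getD u 0 = seq.getD (u + N) 0)) := by
  obtain ⟨m, hm⟩ := hdvd
  have hm1 : 1 ≤ m := by
    rcases Nat.eq_zero_or_pos m with h0 | h1
    · subst h0; simp at hm; omega
    · exact h1
  have hNd : N ≤ iN - pN := by
    calc N = N * 1 := (Nat.mul_one N).symm
      _ ≤ N * m := Nat.mul_le_mul_left N hm1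
      _ = iN - pN := hm.symm
  constructor
  · intro hA u hu1 hu2
    by_cases hu3 : u + N < iN
    · exact hinv u hu1 hu3
    · have hk : u + N - iN < N := by omega
      set k := u + N - iN with hkdef
      have hstep : seq.getD (pN + k) 0 = seq.getD (pN + k + (m - 1) * N) 0 :=
        pvStep seq N pN (iN - N)
          (fun v hv1 hv2 => hinv v hv1 (by omega)) (m - 1) (pN + k) (by omega)
          (by
            have hmm : (m - 1) * N = m * N - N := by rw [Nat.sub_one_mul]
            have hmN : m * N = iN - pN := by rw [Nat.mul_comm] at hm; omega
            omega)
      have hu : pN + k + (m - 1) * N = u := by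
        have hmm : (m - 1) * N = m * N - N := by rw [Nat.sub_one_mul]
        have hmN : m * N = iN - pN := by rw [Nat.mul_comm] at hm; omega
        omega
      rw [hu] at hstep
      have hAk := hA k hk
      have h2 : u + N = iN + k := by omega
      rw [h2, hAk, ← hstep]
  · intro hall k hk
    have hstep : seq.getD (pN + k) 0 = seq.getD (pN + k + m * N) 0 :=
      pvStep seq N pN iN (fun v hv1 hv2 => hall v hv1 hv2) m (pN + k) (by omega)
        (by
          have hmN : m * N = iN - pN := by rw [Nat.mul_comm] at hm; omega
          omega)
    have hu : pN + k + m * N = iN + k := by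
      have hmN : m * N = iN - pN := by rw [Nat.mul_comm] at hm; omega
      omega
    rw [hu] at hstep
    exact hstep.symm

-- constant anchors: block equality at iN extends the constant run to iN + N
lemma pvConstIff (seq : List Int) (N pN iN : Nat) (hN : 1 ≤ N)
    (hlt : pN < iN) (hmod1 : (iN - pN) % N = 1)
    (hinv : ∀ u, pN ≤ u → u < iN → seq.getD u 0 = seq.getD pN 0) :
    ((∀ k, k < N → seq.getD (iN + k) 0 = seq.getD (pN + k) 0) ↔
      (∀ u, pN ≤ u → u < iN + N → seq.getD u 0 = seq.getD pN 0)) := by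
  have hcases : iN - pN = 1 ∨ N + 1 ≤ iN - pN := by
    have := Nat.div_add_mod (iN - pN) N
    rcases Nat.eq_zero_or_pos ((iN - pN) / N) with h0 | h1
    · left
      have h2 := Nat.div_add_mod (iN - pN) N
      rw [hmod1, h0, Nat.mul_zero] at h2
      omega
    · right
      set q := (iN - pN) / N with hq
      have h2 := Nat.div_add_mod (iN - pN) N
      rw [hmod1] at h2
      have h3 : N * 1 ≤ N * q := Nat.mul_le_mul_left N h1
      rw [Nat.mul_one] at h3
      omega
  constructor
  · intro hA
    rcases hcases with hd1 | hdN
    · -- fresh anchor: seq[pN+1+k] = seq[pN+k] chains into a constant window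
      have haux : ∀ t, t ≤ N → seq.getD (pN + t) 0 = seq.getD pN 0 := by
        intro t
        induction t with
        | zero => intro _; rfl
        | succ s ihs =>
          intro hs
          have := hA s (by omega)
          rw [show iN + s = pN + (s + 1) from by omega] at this
          rw [show pN + (s+1) = pN + s + 1 from by omega] at this ⊢
          rw [this]
          exact ihs (by omega)
      intro u hu1 hu2
      have : u - pN ≤ N := by omega
      have := haux (u - pN) this
      rwa [show pN + (u - pN) = u from by omega] at this
    · intro u hu1 hu2
      by_cases hu3 : u < iN
      · exact hinv u hu1 hu3
      · have hk : u - iN < N := by omega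
        rw [show u = iN + (u - iN) from by omega, hA (u - iN) hk]
        exact hinv (pN + (u - iN)) (by omega) (by omega)
  · intro hC k hk
    rw [hC (iN + k) (by omega) (by omega), hC (pN + k) (by omega) (by omega)]

-- ===== the main lock-step lemma =====
lemma pvMain (seq : List Int) (N : Nat) (hN : 1 ≤ N) (hNL : N ≤ seq.length) :
    ∀ fuel (iN pN : Nat) (cur maxc : Int),
      pN < iN → pN + N ≤ seq.length →
      (if N ∣ (iN - pN) then
          (∀ u, pN ≤ u → u + N < iN → seq.getD u 0 = seq.getD (u + N) 0)
        else
          ((iN - pN) % N = 1 ∧ ∀ u, pN ≤ u → u < iN → seq.getD u 0 = seq.getD pN 0)) →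
      pvLoopA seq (N : Int) fuel (iN : Int) cur maxc
          (PySem.List.slice seq (some (pN : Int)) (some ((pN : Int) + (N : Int)))) =
        pvLoopB seq (N : Int) ((pvEruns seq (N : Int)).1) ((pvCruns seq).1) fuel (iN : Int) cur maxc (pN : Int) := by
  intro fuel
  induction fuel with
  | zero => intro iN pN cur maxc _ _ _; rfl
  | succ f ih =>
    intro iN pN cur maxc hpi hpL hinv
    set L := seq.length with hL
    by_cases hcond : iN + N ≤ L
    · -- loop body runs in both
      have hcondA : (iN : Int) ≤ (L : Int) - (N : Int) := by push_cast; omega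
      have heruns : (pvEruns seq (N : Int)).1 = (List.range (L - N)).map (pvErun seq N) :=
        pvErunsFst seq N hNL
      have hcruns : (pvCruns seq).1 = (List.range L).map (pvCrun seq) := pvCrunsFst seq
      simp only [pvLoopA, pvLoopB]
      rw [if_pos hcondA, if_pos hcondA]
      set dN := iN - pN with hdNdef
      have hdpos : 1 ≤ dN := by omega
      have hdcast : (iN : Int) - (pN : Int) = (dN : Int) := by push_cast; omega
      have hAiff := pvSliceEq seq N iN pN (by omega) (by omega)
      have hgetE : PySem.List.pyGetD ((pvEruns seq (N : Int)).1) ((iN : Int) - 1) 0 =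
          pvErun seq N (iN - 1) := by
        rw [show (iN : Int) - 1 = ((iN - 1 : Nat) : Int) from by push_cast; omega,
            heruns, PySem.List.pyGetD_natCast, pvGetMapRange _ _ _ (by omega)]
      have hgetC : PySem.List.pyGetD ((pvCruns seq).1) ((iN : Int) + (N : Int) - 1) 0 =
          pvCrun seq (iN + N - 1) := by
        rw [show (iN : Int) + (N : Int) - 1 = ((iN + N - 1 : Nat) : Int) from by push_cast; omega,
            hcruns, PySem.List.pyGetD_natCast, pvGetMapRange _ _ _ (by omega)]
      have hmodIff : PySem.Int.mod ((iN : Int) - (pN : Int)) (N : Int) = 0 ↔ N ∣ dN := by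
        rw [hdcast, PySem.Int.mod_natCast]
        constructor
        · intro h
          exact Nat.dvd_of_mod_eq_zero (by exact_mod_cast h)
        · intro h
          obtain ⟨c, hc⟩ := h
          rw [hc]
          simp [Nat.mul_mod_right]
      have hErunGe : ((dN : Int) ≤ pvErun seq N (iN - 1)) ↔
          (∀ u, pN ≤ u → u < iN → seq.getD u 0 = seq.getD (u + N) 0) := by
        rw [pvErun_ge_iff seq N (iN - 1) dN (by omega)]
        constructor
        · intro h u h1 h2; exact h u (by omega) (by omega)
        · intro h u h1 h2; exact h u (by omega) (by omega)
      have hCrunGe : ((dN : Int) + (N : Int) ≤ pvCrun seq (iN + N - 1)) ↔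
          (∀ u, pN ≤ u → u < iN + N → seq.getD u 0 = seq.getD pN 0) := by
        rw [show (dN : Int) + (N : Int) = ((dN + N : Nat) : Int) from by push_cast; ring,
            pvCrun_ge_iff seq (iN + N - 1) (dN + N) (by omega)]
        constructor
        · intro h u h1 h2
          rw [h u (by omega) (by omega)]
          exact (h pN (by omega) (by omega)).symm
        · intro h u h1 h2
          rw [h u (by omega) (by omega)]
          exact (h (iN + N - 1) (by omega) (by omega)).symm
      have hcast1 : (iN : Int) + (N : Int) = ((iN + N : Nat) : Int) := by push_cast; ring
      have hcast2 : (iN : Int) + 1 = ((iN + 1 : Nat) : Int) := by push_cast; ring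
      have hmismatch : ∀ u : Nat, (if N ∣ iN + 1 - iN then
            (∀ v, iN ≤ v → v + N < iN + 1 → seq.getD v 0 = seq.getD (v + N) 0)
          else ((iN + 1 - iN) % N = 1 ∧
            ∀ v, iN ≤ v → v < iN + 1 → seq.getD v 0 = seq.getD iN 0)) := by
        intro _
        rw [show iN + 1 - iN = 1 from by omega]
        by_cases hN1 : N ∣ 1
        · rw [if_pos hN1]
          intro v hv1 hv2; omega
        · rw [if_neg hN1]
          have hN2 : 2 ≤ N := by
            rcases Nat.eq_or_lt_of_le hN with h | h
            · exact absurd (show N ∣ 1 from by rw [← h]) hN1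
            · omega
          exact ⟨Nat.mod_eq_of_lt (by omega), fun v hv1 hv2 => by rw [show v = iN from by omega]⟩
      by_cases hdvd : N ∣ dN
      · -- periodic anchor
        rw [if_pos hdvd] at hinv
        have hmodeq : PySem.Int.mod ((iN : Int) - (pN : Int)) (N : Int) = 0 := hmodIff.mpr hdvd
        have hsame : ((iN : Int) - (pN : Int) ≤
              PySem.List.pyGetD (pvEruns seq (N : Int)).1 ((iN : Int) - 1) 0) ↔
            PySem.List.slice seq (some (iN : Int)) (some ((iN : Int) + (N : Int))) =
              PySem.List.slice seq (some (pN : Int)) (some ((pN : Int) + (N : Int))) := by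
          rw [hdcast, hgetE, hErunGe, hAiff]
          exact (pvPeriodicIff seq N pN iN hN (by omega) hdvd hinv).symm
        have hB : (if PySem.Int.mod ((iN : Int) - (pN : Int)) (N : Int) = 0
              then (iN : Int) - (pN : Int) ≤ PySem.List.pyGetD (pvEruns seq (N : Int)).1 ((iN : Int) - 1) 0
              else (iN : Int) - (pN : Int) + (N : Int) ≤ PySem.List.pyGetD (pvCruns seq).1 ((iN : Int) + (N : Int) - 1) 0) ↔
            PySem.List.slice seq (some (iN : Int)) (some ((iN : Int) + (N : Int))) =
              PySem.List.slice seq (some (pN : Int)) (some ((pN : Int) + (N : Int))) := by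
          rw [if_pos hmodeq]; exact hsame
        by_cases hA : PySem.List.slice seq (some (iN : Int)) (some ((iN : Int) + (N : Int))) =
            PySem.List.slice seq (some (pN : Int)) (some ((pN : Int) + (N : Int)))
        · rw [if_pos hA, if_pos (hB.mpr hA), hcast1]
          apply ih (iN + N) pN _ _ (by omega) (by omega)
          rw [if_pos (by
            rw [show iN + N - pN = dN + N from by omega]
            exact Nat.dvd_add hdvd dvd_rfl)]
          intro u hu1 hu2
          exact ((pvPeriodicIff seq N pN iN hN (by omega) hdvd hinv).mp (hAiff.mp hA)) u hu1 (by omega)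
        · rw [if_neg hA, if_neg (fun h => hA (hB.mp h)), hcast2]
          exact ih (iN + 1) iN _ _ (by omega) (by omega) (hmismatch 0)
      · -- constant anchor
        rw [if_neg hdvd] at hinv
        obtain ⟨hmod1, hconst⟩ := hinv
        have hmodne : ¬ PySem.Int.mod ((iN : Int) - (pN : Int)) (N : Int) = 0 :=
          fun h => hdvd (hmodIff.mp h)
        have hsame : ((iN : Int) - (pN : Int) + (N : Int) ≤
              PySem.List.pyGetD (pvCruns seq).1 ((iN : Int) + (N : Int) - 1) 0) ↔
            PySem.List.slice seq (some (iN : Int)) (some ((iN : Int) + (N : Int))) =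
              PySem.List.slice seq (some (pN : Int)) (some ((pN : Int) + (N : Int))) := by
          rw [hdcast, hgetC, hCrunGe, hAiff]
          exact (pvConstIff seq N pN iN hN (by omega) hmod1 hconst).symm
        have hB : (if PySem.Int.mod ((iN : Int) - (pN : Int)) (N : Int) = 0
              then (iN : Int) - (pN : Int) ≤ PySem.List.pyGetD (pvEruns seq (N : Int)).1 ((iN : Int) - 1) 0
              else (iN : Int) - (pN : Int) + (N : Int) ≤ PySem.List.pyGetD (pvCruns seq).1 ((iN : Int) + (N : Int) - 1) 0) ↔
            PySem.List.slice seq (some (iN : Int)) (some ((iN : Int) + (N : Int))) =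
              PySem.List.slice seq (some (pN : Int)) (some ((pN : Int) + (N : Int))) := by
          rw [if_neg hmodne]; exact hsame
        by_cases hA : PySem.List.slice seq (some (iN : Int)) (some ((iN : Int) + (N : Int))) =
            PySem.List.slice seq (some (pN : Int)) (some ((pN : Int) + (N : Int)))
        · rw [if_pos hA, if_pos (hB.mpr hA), hcast1]
          apply ih (iN + N) pN _ _ (by omega) (by omega)
          rw [if_neg (by
            intro h
            rw [show iN + N - pN = dN + N from by omega] at h
            obtain ⟨c, hc⟩ := h
            refine hdvd ⟨c - 1, ?_⟩
            have hmul : N * (c - 1) = N * c - N * 1 := Nat.mul_sub N c 1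
            omega)]
          constructor
          · rw [show iN + N - pN = dN + N from by omega, Nat.add_mod_right]
            exact hmod1
          · intro u hu1 hu2
            exact ((pvConstIff seq N pN iN hN (by omega) hmod1 hconst).mp (hAiff.mp hA)) u hu1 (by omega)
        · rw [if_neg hA, if_neg (fun h => hA (hB.mp h)), hcast2]
          exact ih (iN + 1) iN _ _ (by omega) (by omega) (hmismatch 0)
    · have hcondA : ¬ ((iN : Int) ≤ (L : Int) - (N : Int)) := by push_cast; omega
      rw [pvLoopA, pvLoopB, if_neg hcondA, if_neg hcondA]

-- ===== VERDICT (by name: the statement is the Claim_ definition above) =====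
theorem max_consecutive_repetitions_py_spec : Claim_equal_max_consecutive_repetitions_py := by
  intro seq n _ hpre
  unfold Spec_max_consecutive_repetitions_py
  unfold max_consecutive_repetitions_py max_consecutive_repetitions_py_alt
  by_cases hlen : (seq.length : Int) < n
  · rw [if_pos hlen, if_pos hlen]
  · rw [if_neg hlen, if_neg hlen]
    have hn1 : 1 ≤ n := hpre
    have hnN : n = (n.toNat : Int) := by omega
    set N := n.toNat with hNdef
    have hN : 1 ≤ N := by omega
    have hNL : N ≤ seq.length := by omega
    have h0 : ((0 : Nat) : Int) = (0 : Int) := rfl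
    have := pvMain seq N hN hNL (seq.length + 1) N 0 1 1 (by omega) (by omega) (by
      rw [if_pos (by simp)]
      intro u hu hub; omega)
    rw [hnN]
    simpa using this
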